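-- pv_equiv track=rewrite | github.com/Everplay-Tech/EAOS | Ea_OS/Signals/quenyan/qyn1/format.py | _decode_feature_bits
-- ===== SOURCE A (Python) =====
-- from typing import FrozenSet, Iterable, Iterator, Sequence, Tuple
--
-- _FEATURE_BITS = {
--     "compression:optimisation": 0,
--     "compression:extras": 1,
--     "payload:source-map": 2,
--     "compression:fse": 3,
-- }
--
-- def _decode_feature_bits(bits: int) -> Tuple[FrozenSet[str], FrozenSet[int]]:
--     names = {name for name, index in _FEATURE_BITS.items() if bits & (1 << index)}
--     unknown_indices = {
--         index
--         for index in range(0, 32)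
--         if bits & (1 << index) and index not in _FEATURE_BITS.values()
--     }
--     return frozenset(names), frozenset(unknown_indices)
-- ===== SOURCE B (Python) =====
-- from typing import FrozenSet, Tuple
--
-- _FEATURE_BITS = {
--     "compression:optimisation": 0,
--     "compression:extras": 1,
--     "payload:source-map": 2,
--     "compression:fse": 3,
-- }
--
-- def _decode_feature_bits(bits: int) -> Tuple[FrozenSet[str], FrozenSet[int]]:
--     index_to_name = {index: name for name, index in _FEATURE_BITS.items()}
--     names = set()
--     unknown = set()
--     for index in range(0, 32):
--         if bits & (1 << index):
--             if index in index_to_name: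
--                 names.add(index_to_name[index])
--             else:
--                 unknown.add(index)
--     return frozenset(names), frozenset(unknown)
-- ===== Notes on version B (the rewrite author's own statement) =====
-- stated objective: idiomatic
-- what changed: Replaces the two separate set comprehensions (one over the dict items, one over the bit-index range with a repeated membership scan of _FEATURE_BITS.values()) by one inverted index-to-name map built once and a single classifying pass over the bit positions.
import Mathlib
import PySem

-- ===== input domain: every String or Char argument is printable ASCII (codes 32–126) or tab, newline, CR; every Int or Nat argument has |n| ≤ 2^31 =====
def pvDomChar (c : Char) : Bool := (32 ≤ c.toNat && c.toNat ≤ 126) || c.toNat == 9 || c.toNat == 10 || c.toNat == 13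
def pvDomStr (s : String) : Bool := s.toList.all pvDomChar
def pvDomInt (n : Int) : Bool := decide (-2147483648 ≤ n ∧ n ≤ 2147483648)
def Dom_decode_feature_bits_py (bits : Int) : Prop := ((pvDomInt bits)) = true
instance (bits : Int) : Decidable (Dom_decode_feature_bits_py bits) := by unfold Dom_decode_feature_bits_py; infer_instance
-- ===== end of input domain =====

-- B builds the inverted index→name map once and classifies the bit positions in a single pass
-- (idiomatic decomposition); A uses two separate set comprehensions with a repeated values() scan.

-- ===== PORT A =====
-- _FEATURE_BITS, module constant shared by both versions
def featureBits : List (String × Int) :=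
  [("compression:optimisation", 0), ("compression:extras", 1),
   ("payload:source-map", 2), ("compression:fse", 3)]

def decode_feature_bits_py (bits : Int) : List String × List Int :=
  let names : PySem.Set String :=
    PySem.Set.ofList ((featureBits.filter
      (fun p => PySem.Int.band bits (1 <<< p.2.toNat) != 0)).map Prod.fst)
  let unknown_indices : PySem.Set Int :=
    PySem.Set.ofList ((PySem.List.pyRange 0 32 1).filter
      (fun i => PySem.Int.band bits (1 <<< i.toNat) != 0
                && !((featureBits.map Prod.snd).contains i)))
  (names, unknown_indices)

-- ===== PORT B =====
def decode_feature_bits_py_alt (bits : Int) : List String × List Int :=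
  let indexToName : PySem.Dict Int String :=
    featureBits.foldl (fun d p => d.insert p.2 p.1) PySem.Dict.empty
  let r : PySem.Set String × PySem.Set Int :=
    (PySem.List.pyRange 0 32 1).foldl (fun acc i =>
      if PySem.Int.band bits (1 <<< i.toNat) != 0 then
        match indexToName.get? i with
        | some name => (PySem.Set.add acc.1 name, acc.2)
        | none => (acc.1, PySem.Set.add acc.2 i)
      else acc) (PySem.Set.empty, PySem.Set.empty)
  (r.1, r.2)

-- ===== PRECONDITION & SPEC =====
def Spec_decode_feature_bits_py (bits : Int) (out : List String × List Int) : Prop := out = decode_feature_bits_py_alt bits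
instance (bits : Int) (out : List String × List Int) : Decidable (Spec_decode_feature_bits_py bits out) := by unfold Spec_decode_feature_bits_py; infer_instance

-- ===== CLAIM (what is proved, stated in full; the proofs are below) =====
def Claim_equal_decode_feature_bits_py : Prop := ∀ (bits : Int), Dom_decode_feature_bits_py bits → Spec_decode_feature_bits_py bits (decode_feature_bits_py bits)

-- ===== LEMMAS AND PROOFS =====

-- B's inverted dict, named for the proofs (definitionally the fold in decode_feature_bits_py_alt)
def idxMap : PySem.Dict Int String :=
  featureBits.foldl (fun d p => d.insert p.2 p.1) PySem.Dict.empty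

lemma idxMap_get?_high (i : Int) (h : 4 ≤ i) : idxMap.get? i = none := by
  have he : idxMap = PySem.Dict.mk [((0:Int), "compression:optimisation"), (1, "compression:extras"), (2, "payload:source-map"), (3, "compression:fse")] := by rfl
  rw [he]
  simp only [PySem.Dict.get?_mk_cons, beq_iff_eq]
  have h0 : ¬ ((0:Int) = i) := by omega
  have h1 : ¬ ((1:Int) = i) := by omega
  have h2 : ¬ ((2:Int) = i) := by omega
  have h3 : ¬ ((3:Int) = i) := by omega
  simp [h0, h1, h2, h3, PySem.Dict.get?]

-- phase 2 of B's loop: on positions the inverted map does not know, only the unknown set grows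
lemma phase2 (bits : Int) (l : List Int) (ns : PySem.Set String) (us : PySem.Set Int)
    (hget : ∀ i ∈ l, idxMap.get? i = none) (hnd : l.Nodup) (hdis : ∀ i ∈ l, i ∉ us) :
    l.foldl (fun acc i =>
      if PySem.Int.band bits (1 <<< i.toNat) != 0 then
        match idxMap.get? i with
        | some name => (PySem.Set.add acc.1 name, acc.2)
        | none => (acc.1, PySem.Set.add acc.2 i)
      else acc) (ns, us)
    = (ns, us ++ l.filter (fun i => PySem.Int.band bits (1 <<< i.toNat) != 0)) := by
  induction l generalizing us with
  | nil => simp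
  | cons x xs ih =>
    simp only [List.foldl_cons, List.filter_cons]
    rw [hget x (by simp)]
    by_cases hc : (PySem.Int.band bits (1 <<< x.toNat) != 0) = true
    · simp only [hc, if_true]
      rw [PySem.Set.add_of_not_mem (hdis x (by simp))]
      rw [ih (us ++ [x]) (fun i hi => hget i (List.mem_cons_of_mem _ hi)) hnd.of_cons
          (fun i hi => by
            simp only [List.mem_append, List.mem_singleton, not_or]
            exact ⟨hdis i (List.mem_cons_of_mem _ hi),
                   fun he => (List.nodup_cons.mp hnd).1 (he ▸ hi)⟩)]
      simp
    · simp only [hc, Bool.false_eq_true, if_false]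
      simp only [Bool.not_eq_true] at hc
      rw [ih us (fun i hi => hget i (List.mem_cons_of_mem _ hi)) hnd.of_cons
          (fun i hi => hdis i (List.mem_cons_of_mem _ hi))]

-- phase 1 of B's loop over the four known positions builds exactly A's names set
lemma phase1 (bits : Int) :
    ([(0:Int),1,2,3]).foldl (fun acc i =>
      if PySem.Int.band bits (1 <<< i.toNat) != 0 then
        match idxMap.get? i with
        | some name => (PySem.Set.add acc.1 name, acc.2)
        | none => (acc.1, PySem.Set.add acc.2 i)
      else acc) (PySem.Set.empty, PySem.Set.empty)
    = (PySem.Set.ofList ((featureBits.filter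
        (fun p => PySem.Int.band bits (1 <<< p.2.toNat) != 0)).map Prod.fst),
       PySem.Set.empty) := by
  cases h0 : PySem.Int.band bits (1 <<< (0:Int).toNat) != 0 <;>
  cases h1 : PySem.Int.band bits (1 <<< (1:Int).toNat) != 0 <;>
  cases h2 : PySem.Int.band bits (1 <<< (2:Int).toNat) != 0 <;>
  cases h3 : PySem.Int.band bits (1 <<< (3:Int).toNat) != 0 <;>
    simp only [featureBits, List.foldl, List.filter, List.map, h0, h1, h2, h3] <;> decide

-- A's unknown-index comprehension is B's phase-2 filter over the positions ≥ 4
lemma unknown_filter_eq (bits : Int) :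
    (PySem.List.pyRange 0 32 1).filter
      (fun i => PySem.Int.band bits (1 <<< i.toNat) != 0
                && !((featureBits.map Prod.snd).contains i))
    = (PySem.List.pyRange 4 32 1).filter
        (fun i => PySem.Int.band bits (1 <<< i.toNat) != 0) := by
  have hsplit : PySem.List.pyRange 0 32 1 = [(0:Int),1,2,3] ++ PySem.List.pyRange 4 32 1 := by
    rw [PySem.List.pyRange_one_append 0 4 32 (by norm_num) (by norm_num)]
    rfl
  rw [hsplit, List.filter_append]
  have h1 : ([(0:Int),1,2,3]).filter
      (fun i => PySem.Int.band bits (1 <<< i.toNat) != 0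
                && !((featureBits.map Prod.snd).contains i)) = [] := by
    simp [featureBits]
  rw [h1, List.nil_append]
  apply List.filter_congr
  intro i hi
  have h4 : 4 ≤ i := (PySem.List.mem_pyRange_one.mp hi).1
  have hnc : ((featureBits.map Prod.snd).contains i) = false := by
    simp [featureBits]
    omega
  simp only [hnc, Bool.not_false, Bool.and_true]

lemma decode_eq_alt (bits : Int) : decode_feature_bits_py bits = decode_feature_bits_py_alt bits := by
  have hsplit : PySem.List.pyRange 0 32 1 = [(0:Int),1,2,3] ++ PySem.List.pyRange 4 32 1 := by
    rw [PySem.List.pyRange_one_append 0 4 32 (by norm_num) (by norm_num)]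
    rfl
  unfold decode_feature_bits_py decode_feature_bits_py_alt
  show _ = (let r := (PySem.List.pyRange 0 32 1).foldl (fun acc i =>
      if PySem.Int.band bits (1 <<< i.toNat) != 0 then
        match idxMap.get? i with
        | some name => (PySem.Set.add acc.1 name, acc.2)
        | none => (acc.1, PySem.Set.add acc.2 i)
      else acc) (PySem.Set.empty, PySem.Set.empty)
    (r.1, r.2))
  rw [unknown_filter_eq bits,
      PySem.Set.ofList_eq_self_of_nodup
        ((PySem.List.pyRange 4 32 1).filter (fun i => PySem.Int.band bits (1 <<< i.toNat) != 0))
        ((PySem.List.nodup_pyRange_one _ _).filter _),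
      hsplit, List.foldl_append, phase1 bits,
      phase2 bits _ _ PySem.Set.empty
        (fun i hi => idxMap_get?_high i (PySem.List.mem_pyRange_one.mp hi).1)
        (PySem.List.nodup_pyRange_one _ _)
        (fun i _ => List.not_mem_nil)]
  rfl

-- ===== VERDICT (by name: the statement is the Claim_ definition above) =====
theorem decode_feature_bits_py_spec : Claim_equal_decode_feature_bits_py :=
  fun bits _ => decode_eq_alt bits
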